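-- pv_equiv track=rewrite | github.com/Gnome101/PSAT | services/resolution/capabilities.py | _canon_addresses
-- ===== SOURCE A (Python) =====
-- def _canon_addresses(values: list[str]) -> list[str]:
--     """Lowercase + sort + dedup the address list for stable equality.
--     Members are the universal canonical form for set ops."""
--     seen: set[str] = set()
--     out: list[str] = []
--     for v in sorted(values, key=lambda x: x.lower() if isinstance(x, str) else str(x)):
--         key = v.lower() if isinstance(v, str) else str(v)
--         if key in seen:
--             continue
--         seen.add(key)
--         out.append(key)
--     return out
-- ===== SOURCE B (Python) =====
-- def _canon_addresses(values: list[str]) -> list[str]: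
--     """Build the set of canonical keys in one comprehension, then sort it."""
--     return sorted({v.lower() if isinstance(v, str) else str(v) for v in values})
-- ===== Notes on version B (the rewrite author's own statement) =====
-- stated objective: simpler
-- what changed: B deduplicates first by building the set of lowercased keys in one comprehension and then sorts that set, replacing A's sort-the-full-list-then-scan-with-a-seen-set loop.
import Mathlib
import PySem

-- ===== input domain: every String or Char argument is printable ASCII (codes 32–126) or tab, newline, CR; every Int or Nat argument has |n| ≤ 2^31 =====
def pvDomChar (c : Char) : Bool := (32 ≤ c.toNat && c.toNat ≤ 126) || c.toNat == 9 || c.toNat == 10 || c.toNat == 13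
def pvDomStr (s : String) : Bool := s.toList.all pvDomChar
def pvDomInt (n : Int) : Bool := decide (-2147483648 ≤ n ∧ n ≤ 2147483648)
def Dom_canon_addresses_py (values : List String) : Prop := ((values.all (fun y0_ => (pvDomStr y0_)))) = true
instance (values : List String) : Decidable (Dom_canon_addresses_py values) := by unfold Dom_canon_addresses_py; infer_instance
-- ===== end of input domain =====

-- B deduplicates before sorting (set comprehension of lowered keys, then sorted),
-- replacing A's sort-everything-then-dedup-with-a-seen-set loop; objective: simpler.

-- ===== PORT A =====
-- seen/out loop over sorted(values, key=lower), emitting the lowered key on first sight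
def canon_addresses_py (values : List String) : List String :=
  ((PySem.List.sorted values (fun x => PySem.Str.lower x) false).foldl
    (fun (st : PySem.Set String × List String) v =>
      let key := PySem.Str.lower v
      if PySem.Set.contains st.1 key then st
      else (PySem.Set.add st.1 key, st.2 ++ [key]))
    (PySem.Set.empty, [])).2

-- ===== PORT B =====
-- sorted({v.lower() for v in values})
def canon_addresses_py_alt (values : List String) : List String :=
  PySem.List.sorted (PySem.Set.ofList (values.map (fun v => PySem.Str.lower v)))
    (fun x => x) false

-- ===== PRECONDITION & SPEC =====
def Spec_canon_addresses_py (values : List String) (out : List String) : Prop := out = canon_addresses_py_alt values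
instance (values : List String) (out : List String) : Decidable (Spec_canon_addresses_py values out) := by unfold Spec_canon_addresses_py; infer_instance

-- ===== CLAIM (what is proved, stated in full; the proofs are below) =====
def Claim_equal_canon_addresses_py : Prop := ∀ (values : List String), Dom_canon_addresses_py values → Spec_canon_addresses_py values (canon_addresses_py values)

-- ===== LEMMAS AND PROOFS =====

-- A's seen-set and out-list stay equal, and the loop is exactly folding Set.add
-- over the lowered keys.
theorem canonA_fold_pair (l : List String) (s : List String) :
    (l.foldl
      (fun (st : PySem.Set String × List String) v =>
        let key := PySem.Str.lower v
        if PySem.Set.contains st.1 key then st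
        else (PySem.Set.add st.1 key, st.2 ++ [key])) (s, s))
    = ((l.map (fun v => PySem.Str.lower v)).foldl PySem.Set.add s,
       (l.map (fun v => PySem.Str.lower v)).foldl PySem.Set.add s) := by
  induction l generalizing s with
  | nil => simp
  | cons x xs ih =>
    simp only [List.foldl_cons, List.map_cons]
    have hinit : (if PySem.Set.contains s (PySem.Str.lower x) = true
          then ((s : PySem.Set String), s)
          else (PySem.Set.add s (PySem.Str.lower x), s ++ [PySem.Str.lower x]))
        = (PySem.Set.add s (PySem.Str.lower x), PySem.Set.add s (PySem.Str.lower x)) := by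
      unfold PySem.Set.add
      split_ifs with h <;> rfl
    rw [hinit]
    exact ih (PySem.Set.add s (PySem.Str.lower x))

-- Set.ofList is a sublist (order-preserving first occurrences) of its input.
theorem ofList_sublist (l : List String) : List.Sublist (PySem.Set.ofList l) l := by
  induction l using List.reverseRecOn with
  | nil => simp [PySem.Set.ofList]
  | append_singleton xs x ih =>
    have h : PySem.Set.ofList (xs ++ [x]) = PySem.Set.add (PySem.Set.ofList xs) x := by
      simp [PySem.Set.ofList_eq_foldl, List.foldl_append]
    rw [h]
    unfold PySem.Set.add
    by_cases hc : PySem.Set.contains (PySem.Set.ofList xs) x = true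
    · simp only [hc, if_true]
      exact ih.trans (List.sublist_append_left xs [x])
    · simp only [hc]
      exact ih.append_right [x]

theorem canon_addresses_eq (values : List String) :
    canon_addresses_py values = canon_addresses_py_alt values := by
  unfold canon_addresses_py canon_addresses_py_alt
  rw [show (PySem.Set.empty : PySem.Set String) = ([] : List String) from rfl]
  rw [canonA_fold_pair]
  set K := (PySem.List.sorted values (fun x => PySem.Str.lower x) false).map
    (fun v => PySem.Str.lower v) with hK
  have hA : (K.foldl PySem.Set.add []) = PySem.Set.ofList K :=
    (PySem.Set.ofList_eq_foldl K).symm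
  simp only [hA]
  -- B's sorted(set) equals A's ofList of the sorted keys, by uniqueness of the
  -- strictly increasing rearrangement.
  have hperm : (PySem.Set.ofList K).Perm
      (PySem.Set.ofList (values.map (fun v => PySem.Str.lower v))) := by
    have hKperm : K.Perm (values.map (fun v => PySem.Str.lower v)) :=
      (PySem.List.sorted_perm values (fun x => PySem.Str.lower x) false).map _
    rw [List.perm_ext_iff_of_nodup (PySem.Set.nodup_ofList _) (PySem.Set.nodup_ofList _)]
    intro a
    simp only [PySem.Set.mem_ofList]
    exact ⟨fun h => hKperm.mem_iff.mp h, fun h => hKperm.mem_iff.mpr h⟩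
  have hle : K.Pairwise (· ≤ ·) :=
    PySem.List.sorted_map_key_pairwise values (fun x => PySem.Str.lower x)
  have hle' : (PySem.Set.ofList K).Pairwise (· ≤ ·) :=
    hle.sublist (ofList_sublist K)
  have hne : (PySem.Set.ofList K).Pairwise (· ≠ ·) := PySem.Set.nodup_ofList K
  have hlt : (PySem.Set.ofList K).Pairwise (· < ·) :=
    (hle'.and hne).imp (fun h => lt_of_le_of_ne h.1 h.2)
  exact (PySem.List.sorted_eq_of_perm_of_pairwise_lt _ _ _ hperm hlt).symm

-- ===== VERDICT (by name: the statement is the Claim_ definition above) =====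
theorem canon_addresses_py_spec : Claim_equal_canon_addresses_py := by
  intro values _
  unfold Spec_canon_addresses_py
  exact canon_addresses_eq values
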